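-- pv_equiv track=rewrite | github.com/hretheum/consensus.net | src/services/bugbot/analyzer.py | _analyze_severity
-- ===== SOURCE A (Python) =====
-- from typing import Dict, List, Any, Optional, Tuple
--
-- def _analyze_severity(error_data: Dict[str, Any]) -> str:
--     """Analizuje i ewentualnie modyfikuje poziom severity"""
--     base_severity = error_data.get('severity', 'medium')
--     error_text = error_data.get('error_text', '')
--
--     # Zwiększ severity dla niektórych przypadków
--     severity_upgrades = {
--         'critical': ['OutOfMemory', 'SegmentationFault', 'SystemExit', 'CRITICAL'],
--         'high': ['DatabaseError', 'ConnectionError', 'AuthenticationError'],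
--         'medium': ['TimeoutError', 'ValidationError']
--     }
--
--     for level, keywords in severity_upgrades.items():
--         for keyword in keywords:
--             if keyword in error_text:
--                 # Upgrade severity jeśli znaleziono słowo kluczowe
--                 if level == 'critical':
--                     return 'critical'
--                 elif level == 'high' and base_severity in ['medium', 'low']:
--                     return 'high'
--                 elif level == 'medium' and base_severity == 'low':
--                     return 'medium'
--
--     return base_severity
-- ===== SOURCE B (Python) =====
-- # Rank-based rewrite: compute the highest detected keyword rank in one max-scan,
-- # then upgrade arithmetically via a rank table instead of branch-by-branch guards.
-- _RANKED_KEYWORDS = (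
--     (3, 'OutOfMemory'), (3, 'SegmentationFault'), (3, 'SystemExit'), (3, 'CRITICAL'),
--     (2, 'DatabaseError'), (2, 'ConnectionError'), (2, 'AuthenticationError'),
--     (1, 'TimeoutError'), (1, 'ValidationError'),
-- )
--
-- _LEVEL_NAMES = ('low', 'medium', 'high', 'critical')
--
--
-- def _analyze_severity(error_data):
--     """Analizuje i ewentualnie modyfikuje poziom severity"""
--     base_severity = error_data.get('severity', 'medium')
--     error_text = error_data.get('error_text', '')
--
--     # Highest-ranked keyword present in the text (0 = none found).
--     detected = 0
--     for rank, keyword in _RANKED_KEYWORDS: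
--         if keyword in error_text and rank > detected:
--             detected = rank
--
--     if detected == 3:
--         return 'critical'          # critical upgrade is unconditional
--
--     rank_of = {'low': 0, 'medium': 1, 'high': 2, 'critical': 3}
--     base_rank = rank_of.get(base_severity)
--     if base_rank is not None and detected > base_rank:
--         return _LEVEL_NAMES[detected]
--     return base_severity
-- ===== Notes on version B (the rewrite author's own statement) =====
-- stated objective: alternative
-- what changed: Replaced A's nested dict-of-keyword-lists loops with early returns by rank arithmetic: one max-scan over a flat module-level (rank, keyword) table computes the highest detected rank, then a string-to-rank table and a numeric comparison decide the upgrade, indexing a level-name tuple for the result.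
import Mathlib
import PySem

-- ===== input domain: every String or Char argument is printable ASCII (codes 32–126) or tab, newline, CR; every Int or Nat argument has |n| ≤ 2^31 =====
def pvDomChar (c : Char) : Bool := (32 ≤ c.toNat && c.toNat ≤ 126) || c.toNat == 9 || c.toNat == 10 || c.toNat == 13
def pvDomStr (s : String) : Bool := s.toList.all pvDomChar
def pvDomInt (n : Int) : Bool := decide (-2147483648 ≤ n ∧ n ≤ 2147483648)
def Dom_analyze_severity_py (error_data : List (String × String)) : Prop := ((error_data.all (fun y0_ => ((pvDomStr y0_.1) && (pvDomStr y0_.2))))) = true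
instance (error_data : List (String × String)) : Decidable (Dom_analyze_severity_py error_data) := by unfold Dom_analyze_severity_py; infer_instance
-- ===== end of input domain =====

-- B replaces A's nested loops with early returns by a rank-based computation: one max-scan
-- finds the highest keyword rank, then a numeric rank table decides the upgrade; objective: alternative.
-- ===== PORT A =====
-- inner 'for keyword in keywords' loop: first found keyword triggers the if/elif chain;
-- a fall-through (no return) continues with the next keyword
def aInnerLoop (level base text : String) : List String → Option String
  | [] => none
  | k :: ks =>
    if PySem.Str.isIn k text then
      if level == "critical" then some "critical"
      else if level == "high" && (base == "medium" || base == "low") then some "high"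
      else if level == "medium" && base == "low" then some "medium"
      else aInnerLoop level base text ks
    else aInnerLoop level base text ks

-- outer 'for level, keywords in severity_upgrades.items()' loop; 'some' models an early return
def aOuterLoop (base text : String) : List (String × List String) → Option String
  | [] => none
  | (level, kws) :: rest =>
    match aInnerLoop level base text kws with
    | some r => some r
    | none => aOuterLoop base text rest

def analyze_severity_py (error_data : List (String × String)) : String :=
  let base_severity := PySem.Dict.getD (PySem.Dict.mk error_data) "severity" "medium"
  let error_text := PySem.Dict.getD (PySem.Dict.mk error_data) "error_text" ""
  let severity_upgrades : List (String × List String) :=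
    [("critical", ["OutOfMemory", "SegmentationFault", "SystemExit", "CRITICAL"]),
     ("high", ["DatabaseError", "ConnectionError", "AuthenticationError"]),
     ("medium", ["TimeoutError", "ValidationError"])]
  match aOuterLoop base_severity error_text severity_upgrades with
  | some r => r
  | none => base_severity

-- ===== PORT B =====
def rankedKeywords : List (Int × String) :=
  [(3, "OutOfMemory"), (3, "SegmentationFault"), (3, "SystemExit"), (3, "CRITICAL"),
   (2, "DatabaseError"), (2, "ConnectionError"), (2, "AuthenticationError"),
   (1, "TimeoutError"), (1, "ValidationError")]

def levelNames : List String := ["low", "medium", "high", "critical"]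

-- loop body of B's max-scan over the ranked keyword table
def stepB (text : String) (acc : Int) (p : Int × String) : Int :=
  if PySem.Str.isIn p.2 text && acc < p.1 then p.1 else acc

def analyze_severity_py_alt (error_data : List (String × String)) : String :=
  let base_severity := PySem.Dict.getD (PySem.Dict.mk error_data) "severity" "medium"
  let error_text := PySem.Dict.getD (PySem.Dict.mk error_data) "error_text" ""
  -- highest-ranked keyword present in the text (0 = none found)
  let detected : Int := rankedKeywords.foldl (stepB error_text) 0
  if detected == 3 then "critical"
  else
    let rank_of := PySem.Dict.mk [("low", (0 : Int)), ("medium", 1), ("high", 2), ("critical", 3)]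
    match PySem.Dict.get? rank_of base_severity with
    | some base_rank =>
      if detected > base_rank then
        -- here detected ∈ {1, 2}, so the index is always in range
        (PySem.List.pyGet? levelNames detected).getD base_severity
      else base_severity
    | none => base_severity

-- ===== PRECONDITION & SPEC =====
def Spec_analyze_severity_py (error_data : List (String × String)) (out : String) : Prop := out = analyze_severity_py_alt error_data
instance (error_data : List (String × String)) (out : String) : Decidable (Spec_analyze_severity_py error_data out) := by unfold Spec_analyze_severity_py; infer_instance

-- ===== CLAIM (what is proved, stated in full; the proofs are below) =====
def Claim_equal_analyze_severity_py : Prop := ∀ (error_data : List (String × String)), Dom_analyze_severity_py error_data → Spec_analyze_severity_py error_data (analyze_severity_py error_data)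

-- ===== LEMMAS AND PROOFS =====

-- the inner loop returns the level's fixed upgrade value iff some keyword of the level occurs
theorem aInnerLoop_eq (level base text : String) (ks : List String) :
    aInnerLoop level base text ks =
      (if ks.any (fun k => PySem.Str.isIn k text) then
        (if level == "critical" then some "critical"
         else if level == "high" && (base == "medium" || base == "low") then some "high"
         else if level == "medium" && base == "low" then some "medium"
         else none)
       else none) := by
  induction ks with
  | nil => simp [aInnerLoop]
  | cons k ks ih =>
    by_cases hk : PySem.Str.isIn k text = true
    · simp only [aInnerLoop, hk, if_true, List.any_cons, Bool.true_or, ih]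
      split_ifs <;> simp_all
    · simp only [aInnerLoop, hk, if_false, Bool.false_eq_true, ih, List.any_cons, Bool.false_or]

-- B's max-scan over a uniform-rank segment: the accumulator rises to the rank iff a keyword occurs
theorem fold_uniform (text : String) (r a : Int) (ks : List String) :
    List.foldl (stepB text) a (ks.map (fun k => (r, k))) =
      (if ks.any (fun k => PySem.Str.isIn k text) && a < r then r else a) := by
  induction ks generalizing a with
  | nil => simp
  | cons k ks ih =>
    simp only [List.map_cons, List.foldl_cons, stepB, List.any_cons, ih]
    by_cases hk : PySem.Str.isIn k text = true
    · by_cases ha : a < r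
      · simp_all
      · simp_all
        intro x hx hxx
        rw [if_neg (not_lt.mpr ha)]
        intro h
        omega
    · simp_all

-- B's max-scan as a function of the three group presence flags
theorem detected_eq (text : String) :
    rankedKeywords.foldl (stepB text) 0 =
    (if ["OutOfMemory", "SegmentationFault", "SystemExit", "CRITICAL"].any
        (fun k => PySem.Str.isIn k text) then 3
     else if ["DatabaseError", "ConnectionError", "AuthenticationError"].any
        (fun k => PySem.Str.isIn k text) then 2
     else if ["TimeoutError", "ValidationError"].any
        (fun k => PySem.Str.isIn k text) then 1
     else 0) := by
  have hsplit : rankedKeywords =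
      (["OutOfMemory", "SegmentationFault", "SystemExit", "CRITICAL"].map (fun k => ((3 : Int), k))) ++
      (["DatabaseError", "ConnectionError", "AuthenticationError"].map (fun k => ((2 : Int), k))) ++
      (["TimeoutError", "ValidationError"].map (fun k => ((1 : Int), k))) := rfl
  rw [hsplit, List.foldl_append, List.foldl_append, fold_uniform, fold_uniform, fold_uniform]
  by_cases h1 : (["OutOfMemory", "SegmentationFault", "SystemExit", "CRITICAL"].any
      (fun k => PySem.Str.isIn k text)) = true <;>
  by_cases h2 : (["DatabaseError", "ConnectionError", "AuthenticationError"].any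
      (fun k => PySem.Str.isIn k text)) = true <;>
  by_cases h3 : (["TimeoutError", "ValidationError"].any
      (fun k => PySem.Str.isIn k text)) = true <;>
  simp_all

-- for a base severity outside the rank table, the lookup misses
theorem rankOf_none (base : String) (h0 : ¬ base = "low") (h1 : ¬ base = "medium")
    (h2 : ¬ base = "high") (h3 : ¬ base = "critical") :
    PySem.Dict.get? (PySem.Dict.mk [("low", (0 : Int)), ("medium", 1), ("high", 2), ("critical", 3)]) base = none := by
  have e0 : ("low" == base) = false := beq_eq_false_iff_ne.mpr (fun h => h0 h.symm)
  have e1 : ("medium" == base) = false := beq_eq_false_iff_ne.mpr (fun h => h1 h.symm)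
  have e2 : ("high" == base) = false := beq_eq_false_iff_ne.mpr (fun h => h2 h.symm)
  have e3 : ("critical" == base) = false := beq_eq_false_iff_ne.mpr (fun h => h3 h.symm)
  simp [PySem.Dict.get?, List.find?, e0, e1, e2, e3]

-- B's decision tail (rank lookup + index) as an explicit conditional on the base string,
-- for the non-critical detected values 0, 1, 2
theorem bTail_eq (base : String) (d : Int) (hd : d = 0 ∨ d = 1 ∨ d = 2) :
    (match PySem.Dict.get? (PySem.Dict.mk [("low", (0 : Int)), ("medium", 1), ("high", 2), ("critical", 3)]) base with
     | some base_rank =>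
       if d > base_rank then (PySem.List.pyGet? levelNames d).getD base else base
     | none => base) =
    (if d == 2 && (base == "medium" || base == "low") then "high"
     else if d == 1 && base == "low" then "medium"
     else base) := by
  by_cases h0 : base = "low"
  · subst h0; rcases hd with h | h | h <;> subst h <;> decide
  · by_cases h1 : base = "medium"
    · subst h1; rcases hd with h | h | h <;> subst h <;> decide
    · by_cases h2 : base = "high"
      · subst h2; rcases hd with h | h | h <;> subst h <;> decide
      · by_cases h3 : base = "critical"
        · subst h3; rcases hd with h | h | h <;> subst h <;> decide
        · rw [rankOf_none base h0 h1 h2 h3]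
          simp [h0, h1]

-- ===== VERDICT (by name: the statement is the Claim_ definition above) =====
theorem analyze_severity_py_spec : Claim_equal_analyze_severity_py := by
  intro error_data _
  unfold Spec_analyze_severity_py analyze_severity_py analyze_severity_py_alt
  dsimp only
  rw [detected_eq]
  generalize (PySem.Dict.getD (PySem.Dict.mk error_data) "error_text" "") = text
  generalize (PySem.Dict.getD (PySem.Dict.mk error_data) "severity" "medium") = base
  by_cases h1 : (["OutOfMemory", "SegmentationFault", "SystemExit", "CRITICAL"].any
      (fun k => PySem.Str.isIn k text)) = true <;>
  by_cases h2 : (["DatabaseError", "ConnectionError", "AuthenticationError"].any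
      (fun k => PySem.Str.isIn k text)) = true <;>
  by_cases h3 : (["TimeoutError", "ValidationError"].any
      (fun k => PySem.Str.isIn k text)) = true <;>
  simp only [aOuterLoop, aInnerLoop_eq, h1, h2, h3, if_true, if_false, Bool.false_eq_true,
    Bool.true_and, beq_self_eq_true] <;>
  rw [bTail_eq base _ (by norm_num)] <;>
  split_ifs <;> simp_all
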